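-- pv_equiv track=rewrite | github.com/brianhilsden/DSA | Bank-transfers.py | bankSolution
-- ===== SOURCE A (Python) =====
-- def bankSolution(char, arr, N):
--     bankA = 0
--     bankB = 0
--     initialBankA = 0
--     initialBankB = 0
--
--     for i in range(N):
--         if char[i] == "A":
--             if bankB >= arr[i]:
--                 bankB -= arr[i]
--             else:
--
--                 shortfall = arr[i] - bankB
--                 initialBankB += shortfall
--                 bankB = 0
--             bankA += arr[i]
--
--         elif char[i] == "B":
--             if bankA >= arr[i]:
--                 bankA -= arr[i]
--             else:
--
--                 shortfall = arr[i] - bankA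
--                 initialBankA += shortfall
--                 bankA = 0
--             bankB += arr[i]
--
--
--
--     return [initialBankA, initialBankB]
-- ===== SOURCE B (Python) =====
-- def _need(evs):
--     # minimum initial balance = -(lowest running balance seen at a debit point)
--     bal = low = 0
--     for d, debit in evs:
--         bal += d
--         if debit:
--             low = min(low, bal)
--     return -low
--
-- def bankSolution(char, arr, N):
--     # Phase 1: one pass building bank A's signed event stream (delta, is_debit).
--     evs = []
--     for i in range(N):
--         if char[i] == "A":
--             evs.append((arr[i], False))
--         elif char[i] == "B":
--             evs.append((-arr[i], True))
--     # Bank B's stream is the exact mirror: negate deltas, flip debit flags.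
--     return [_need(evs), _need([(-d, not s) for d, s in evs])]
-- ===== Notes on version B (the rewrite author's own statement) =====
-- stated objective: alternative
-- what changed: B splits A's single four-variable clamp/shortfall loop into two phases: a pass materializing bank A's flagged event stream (signed delta, is-debit), a mirror map (negate delta, flip flag) giving bank B's stream, and a shared prefix-min reduction helper returning the negated lowest balance at debit points.
import Mathlib
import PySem

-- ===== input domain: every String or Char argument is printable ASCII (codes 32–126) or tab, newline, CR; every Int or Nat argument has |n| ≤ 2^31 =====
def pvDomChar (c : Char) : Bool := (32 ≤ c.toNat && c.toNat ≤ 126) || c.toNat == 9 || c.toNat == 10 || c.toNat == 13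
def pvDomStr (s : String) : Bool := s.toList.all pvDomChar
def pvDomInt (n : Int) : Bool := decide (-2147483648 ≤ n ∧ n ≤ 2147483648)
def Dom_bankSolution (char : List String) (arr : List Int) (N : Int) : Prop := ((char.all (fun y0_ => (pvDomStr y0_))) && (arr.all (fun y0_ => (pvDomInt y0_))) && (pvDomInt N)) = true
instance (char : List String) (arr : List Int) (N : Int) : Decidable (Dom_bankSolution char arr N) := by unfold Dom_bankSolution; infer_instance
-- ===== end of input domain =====

-- B replaces A's single four-variable clamp/shortfall loop by two phases: build bank A's
-- flagged event stream, mirror it for bank B, reduce each with a shared prefix-min helper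
-- (objective: alternative, same O(N)).

-- ===== PORT A =====
-- state = (bankA, bankB, initialBankA, initialBankB); one loop step of A
def pvStepA (char : List String) (arr : List Int)
    (st : Int × Int × Int × Int) (i : Int) : Int × Int × Int × Int :=
  let c := PySem.List.pyGetD char i ""
  let a := PySem.List.pyGetD arr i 0
  if c = "A" then
    if st.2.1 ≥ a then (st.1 + a, st.2.1 - a, st.2.2.1, st.2.2.2)
    else (st.1 + a, 0, st.2.2.1, st.2.2.2 + (a - st.2.1))
  else if c = "B" then
    if st.1 ≥ a then (st.1 - a, st.2.1 + a, st.2.2.1, st.2.2.2)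
    else (0, st.2.1 + a, st.2.2.1 + (a - st.1), st.2.2.2)
  else st

def bankSolution (char : List String) (arr : List Int) (N : Int) : List Int :=
  let s := (PySem.List.pyRange 0 N 1).foldl (pvStepA char arr) (0, 0, 0, 0)
  [s.2.2.1, s.2.2.2]

-- ===== PORT B =====
-- helper _need: minimum initial balance = -(lowest running balance at a debit point)
def pvNeedStep (p : Int × Int) (e : Int × Bool) : Int × Int :=
  let bal := p.1 + e.1
  (bal, if e.2 then min p.2 bal else p.2)

def pvNeed (evs : List (Int × Bool)) : Int := -((evs.foldl pvNeedStep (0, 0)).2)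

-- phase 1 of Source B: the append loop building bank A's event stream
def pvEvents (char : List String) (arr : List Int) (idxs : List Int) : List (Int × Bool) :=
  idxs.foldl (fun acc i =>
    let c := PySem.List.pyGetD char i ""
    if c = "A" then acc ++ [(PySem.List.pyGetD arr i 0, false)]
    else if c = "B" then acc ++ [(-(PySem.List.pyGetD arr i 0), true)]
    else acc) []

def bankSolution_alt (char : List String) (arr : List Int) (N : Int) : List Int :=
  let evs := pvEvents char arr (PySem.List.pyRange 0 N 1)
  [pvNeed evs, pvNeed (evs.map (fun e => (-e.1, !e.2)))]

-- ===== PRECONDITION & SPEC =====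
-- Pre_ excludes exactly the inputs where A raises IndexError: some i in range(N) with
-- char[i] out of range, or char[i] in {"A","B"} and arr[i] out of range.
def Pre_bankSolution (char : List String) (arr : List Int) (N : Int) : Prop :=
  N ≤ (char.length : Int) ∧
    ∀ i ∈ List.range N.toNat,
      (char.getD i "" = "A" ∨ char.getD i "" = "B") → i < arr.length
instance (char : List String) (arr : List Int) (N : Int) : Decidable (Pre_bankSolution char arr N) := by unfold Pre_bankSolution; infer_instance

def pvWitness_bankSolution : List String × List Int × Int := (["A", "B", "A"], [5, 3, 2], 3)

def Spec_bankSolution (char : List String) (arr : List Int) (N : Int) (out : List Int) : Prop := out = bankSolution_alt char arr N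
instance (char : List String) (arr : List Int) (N : Int) (out : List Int) : Decidable (Spec_bankSolution char arr N out) := by unfold Spec_bankSolution; infer_instance

-- ===== CLAIM (what is proved, stated in full; the proofs are below) =====
def Claim_equal_bankSolution : Prop := ∀ (char : List String) (arr : List Int) (N : Int), Dom_bankSolution char arr N → Pre_bankSolution char arr N → Spec_bankSolution char arr N (bankSolution char arr N)

-- ===== LEMMAS AND PROOFS =====

-- bank A's per-index event block
def pvDelta (char : List String) (arr : List Int) (i : Int) : List (Int × Bool) :=
  let c := PySem.List.pyGetD char i ""
  if c = "A" then [(PySem.List.pyGetD arr i 0, false)]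
  else if c = "B" then [(-(PySem.List.pyGetD arr i 0), true)]
  else []

theorem pvEvents_eq_flatMap (char : List String) (arr : List Int) (l : List Int)
    (acc : List (Int × Bool)) :
    l.foldl (fun acc i =>
      let c := PySem.List.pyGetD char i ""
      if c = "A" then acc ++ [(PySem.List.pyGetD arr i 0, false)]
      else if c = "B" then acc ++ [(-(PySem.List.pyGetD arr i 0), true)]
      else acc) acc = acc ++ l.flatMap (pvDelta char arr) := by
  induction l generalizing acc with
  | nil => simp
  | cons x xs ih =>
    simp only [List.foldl_cons, List.flatMap_cons, ih, pvDelta]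
    split_ifs <;> simp

-- invariant: A's state vs the two pvNeed fold states (bank A side pA, bank B side pB)
def pvRel (sA : Int × Int × Int × Int) (pA pB : Int × Int) : Prop :=
  sA.1 = pA.1 - pA.2 ∧ sA.2.1 = pB.1 - pB.2 ∧ sA.2.2.1 = -pA.2 ∧ sA.2.2.2 = -pB.2

theorem pvStep_rel (char : List String) (arr : List Int) (i : Int)
    (sA : Int × Int × Int × Int) (pA pB : Int × Int) (h : pvRel sA pA pB) :
    pvRel (pvStepA char arr sA i)
      ((pvDelta char arr i).foldl pvNeedStep pA)
      (((pvDelta char arr i).map (fun e => (-e.1, !e.2))).foldl pvNeedStep pB) := by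
  obtain ⟨a1, a2, a3, a4⟩ := sA
  obtain ⟨b1, b2⟩ := pA
  obtain ⟨c1, c2⟩ := pB
  obtain ⟨h1, h2, h3, h4⟩ := h
  simp only [pvRel] at *
  simp only [pvStepA, pvDelta]
  split_ifs <;> simp_all [pvNeedStep, min_def] <;> omega

theorem pvFold_rel (char : List String) (arr : List Int) (l : List Int)
    (sA : Int × Int × Int × Int) (pA pB : Int × Int) (h : pvRel sA pA pB) :
    pvRel (l.foldl (pvStepA char arr) sA)
      ((l.flatMap (pvDelta char arr)).foldl pvNeedStep pA)
      (((l.flatMap (pvDelta char arr)).map (fun e => (-e.1, !e.2))).foldl pvNeedStep pB) := by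
  induction l generalizing sA pA pB with
  | nil => exact h
  | cons x xs ih =>
    simp only [List.foldl_cons, List.flatMap_cons, List.map_append, List.foldl_append]
    exact ih _ _ _ (pvStep_rel char arr x sA pA pB h)

-- ===== VERDICT (by name: the statement is the Claim_ definition above) =====
theorem bankSolution_spec : Claim_equal_bankSolution := by
  intro char arr N _ _
  unfold Spec_bankSolution bankSolution bankSolution_alt pvEvents pvNeed
  rw [pvEvents_eq_flatMap]
  have h := pvFold_rel char arr (PySem.List.pyRange 0 N 1) (0, 0, 0, 0) (0, 0) (0, 0)
    (by simp [pvRel])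
  obtain ⟨_, _, h3, h4⟩ := h
  simp only [List.nil_append]
  simp [h3, h4]
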